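-- pv_equiv track=rewrite | github.com/thearnavgarg/Common_Interview_Questions | Other Sources/python/arrays/foobarlevel1.py | answer
-- ===== SOURCE A (Python) =====
-- def answer(data, n):
--   occurrence_map = {}
--   for task_id in data:
--     if task_id in occurrence_map:
--       occurrence_map[task_id] += 1
--     else:
--       occurrence_map[task_id] = 1
--   # because the list takes less than 100 ints
--   # space complexity is not a very big issue
--   # we could have also just done data.delete()
--   new_data = []
--   for task_id in data:
--     if occurrence_map[task_id] <= n:
--       new_data.append(task_id)
--   return new_data
-- ===== SOURCE B (Python) =====
-- def answer(data, n):
--   # Online single pass: append optimistically; when an element's running count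
--   # first exceeds n, ban it and scrub its earlier copies from the output.
--   out = []
--   counts = {}
--   banned = set()
--   for x in data:
--     c = counts.get(x, 0) + 1
--     counts[x] = c
--     if x in banned:
--       continue
--     if c > n:
--       banned.add(x)
--       out = [y for y in out if y != x]
--     else:
--       out.append(x)
--   return out
-- ===== Notes on version B (the rewrite author's own statement) =====
-- stated objective: alternative
-- what changed: Replaced A's two staged passes (build a full frequency table, then filter against it) with a single online pass that appends each element optimistically and, the moment an element's running count exceeds n, bans it and retroactively scrubs its earlier copies from the output.
import Mathlib
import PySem

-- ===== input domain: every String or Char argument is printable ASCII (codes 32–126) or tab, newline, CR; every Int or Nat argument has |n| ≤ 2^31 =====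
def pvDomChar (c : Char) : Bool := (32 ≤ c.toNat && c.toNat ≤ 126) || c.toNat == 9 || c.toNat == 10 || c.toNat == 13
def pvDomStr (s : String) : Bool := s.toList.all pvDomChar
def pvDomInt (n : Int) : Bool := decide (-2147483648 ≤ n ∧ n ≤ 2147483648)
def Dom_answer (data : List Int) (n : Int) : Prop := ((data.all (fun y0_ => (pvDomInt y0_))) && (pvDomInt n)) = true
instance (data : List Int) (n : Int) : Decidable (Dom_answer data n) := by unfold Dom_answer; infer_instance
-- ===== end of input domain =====

-- B replaces A's two staged passes (build a frequency table, then filter against it) with a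
-- single online pass: append each element optimistically; when its running count first
-- exceeds n, ban it and scrub its earlier copies from the output. Same return value.

-- ===== PORT A =====
-- first loop: build occurrence_map ('if task_id in occurrence_map: += 1 else: = 1')
def answerBuild (data : List Int) : PySem.Dict Int Int :=
  data.foldl (fun d x => if d.contains x then d.modify x 0 (· + 1) else d.insert x 1) PySem.Dict.empty

def answer (data : List Int) (n : Int) : List Int :=
  let occ := answerBuild data
  -- second loop: occurrence_map[task_id] always present for task_id ∈ data, so getD is exact here
  data.foldl (fun acc x => if occ.getD x 0 ≤ n then acc ++ [x] else acc) []

-- ===== PORT B =====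
-- loop body: c = counts.get(x,0)+1; counts[x] = c; if x in banned: continue;
-- if c > n: banned.add(x); out = [y for y in out if y != x]; else: out.append(x)
def answerAltStep (n : Int) (s : List Int × PySem.Dict Int Int × PySem.Set Int) (x : Int) :
    List Int × PySem.Dict Int Int × PySem.Set Int :=
  let c := s.2.1.getD x 0 + 1
  let counts := s.2.1.insert x c
  if PySem.Set.contains s.2.2 x then (s.1, counts, s.2.2)
  else if n < c then (s.1.filter (fun y => y != x), counts, PySem.Set.add s.2.2 x)
  else (s.1 ++ [x], counts, s.2.2)

def answer_alt (data : List Int) (n : Int) : List Int :=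
  (data.foldl (answerAltStep n) ([], PySem.Dict.empty, PySem.Set.empty)).1

-- ===== PRECONDITION & SPEC =====
def Spec_answer (data : List Int) (n : Int) (out : List Int) : Prop := out = answer_alt data n
instance (data : List Int) (n : Int) (out : List Int) : Decidable (Spec_answer data n out) := by unfold Spec_answer; infer_instance

-- ===== CLAIM (what is proved, stated in full; the proofs are below) =====
def Claim_equal_answer : Prop := ∀ (data : List Int) (n : Int), Dom_answer data n → Spec_answer data n (answer data n)

-- ===== LEMMAS AND PROOFS =====

-- A's build loop counts occurrences: the dict lookup equals List.count
theorem answerBuild_getD_aux (l : List Int) (d : PySem.Dict Int Int) (v : Int) :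
    (l.foldl (fun d x => if d.contains x then d.modify x 0 (· + 1) else d.insert x 1) d).getD v 0
      = d.getD v 0 + l.count v := by
  induction l generalizing d with
  | nil => simp
  | cons x l ih =>
    simp only [List.foldl_cons, ih, List.count_cons]
    by_cases hc : d.contains x
    · simp only [hc, if_true]
      by_cases hv : v = x
      · subst hv
        rw [PySem.Dict.getD_modify_self]
        simp; omega
      · rw [PySem.Dict.getD_modify_of_ne _ _ _ hv]
        simp
        exact fun h => hv h.symm
    · simp only [hc, if_false, Bool.false_eq_true]
      by_cases hv : v = x
      · subst hv
        rw [PySem.Dict.getD_insert_self,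
            PySem.Dict.getD_of_not_contains _ _ (by simpa using hc)]
        simp; omega
      · rw [PySem.Dict.getD_insert_of_ne _ _ _ hv]
        simp
        exact fun h => hv h.symm

theorem answerBuild_getD (data : List Int) (v : Int) :
    (answerBuild data).getD v 0 = data.count v := by
  unfold answerBuild
  rw [answerBuild_getD_aux]
  simp

-- A's filter loop: A's result is the filter against total counts
theorem answer_eq_filter (data : List Int) (n : Int) :
    answer data n = data.filter (fun x => decide ((data.count x : Int) ≤ n)) := by
  unfold answer
  rw [PySem.List.foldl_append_ite_eq_filter (fun x => (answerBuild data).getD x 0 ≤ n)]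
  simp only [List.nil_append]
  apply List.filter_congr
  intro x _
  rw [answerBuild_getD]

-- B's loop invariant: after processing the prefix, out is the prefix filtered by its own
-- counts, counts is the prefix's frequency table, and banned holds exactly the over-limit values
def AltInv (n : Int) (pref : List Int) (s : List Int × PySem.Dict Int Int × PySem.Set Int) : Prop :=
  s.1 = pref.filter (fun y => decide ((pref.count y : Int) ≤ n))
  ∧ (∀ v, s.2.1.getD v 0 = pref.count v)
  ∧ (∀ v, v ∈ s.2.2 ↔ v ∈ pref ∧ n < (pref.count v : Int))

theorem altStep_inv (n : Int) (pref : List Int) (x : Int)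
    (s : List Int × PySem.Dict Int Int × PySem.Set Int) (h : AltInv n pref s) :
    AltInv n (pref ++ [x]) (answerAltStep n s x) := by
  obtain ⟨hout, hcnt, hban⟩ := h
  have hcx : ∀ v, ((pref ++ [x]).count v : Int)
      = (pref.count v : Int) + (if v = x then 1 else 0) := by
    intro v
    by_cases hv : v = x <;> simp [List.count_append, hv, List.count_singleton'] <;> omega
  unfold answerAltStep
  simp only [hcnt x]
  have hget : ∀ v, (s.2.1.insert x (pref.count x + 1)).getD v 0 = ((pref ++ [x]).count v : Int) := by
    intro v
    rw [PySem.Dict.getD_insert, hcx v]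
    by_cases hv : v = x <;> simp [hv, hcnt v]
  -- the filtered prefix is unchanged when x's new count stays on the same side of n for x
  have hpref : ¬ (pref.count x : Int) ≤ n ∨ (pref.count x + 1 : Int) ≤ n →
      pref.filter (fun y => decide (((pref ++ [x]).count y : Int) ≤ n))
        = pref.filter (fun y => decide ((pref.count y : Int) ≤ n)) := by
    intro hc
    apply List.filter_congr; intro y _
    rw [hcx y]
    by_cases hy : y = x <;> rcases hc with hc | hc <;> simp [hy] <;> omega
  by_cases hb : PySem.Set.contains s.2.2 x
  · -- already banned: n < pref.count x; out and banned unchanged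
    have hbx : n < (pref.count x : Int) :=
      ((hban x).1 (by simpa [PySem.Set.contains_iff] using hb)).2
    have hfx : decide (((pref ++ [x]).count x : Int) ≤ n) = false := by
      rw [decide_eq_false_iff_not, hcx x]; simp; omega
    simp only [hb, if_true]
    refine ⟨?_, hget, ?_⟩
    · rw [hout, List.filter_append, hpref (Or.inl (by omega)),
        List.filter_cons, List.filter_nil, hfx]
      simp
    · intro v
      rw [hban v, hcx v]
      by_cases hv : v = x
      · have hbm : x ∈ s.2.2 := by simpa [PySem.Set.contains_iff] using hb
        have hbp : x ∈ pref := ((hban x).1 hbm).1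
        subst hv
        simp [List.mem_append, hbp, hbx]
        omega
      · simp [hv, List.mem_append]
  · have hxn : x ∉ s.2.2 := by simpa [PySem.Set.contains_iff] using hb
    simp only [hb, if_false, Bool.false_eq_true]
    by_cases hgt : n < pref.count x + 1
    · -- count just exceeded n: ban x and scrub it from out
      have hfx : decide (((pref ++ [x]).count x : Int) ≤ n) = false := by
        rw [decide_eq_false_iff_not, hcx x]; simp; omega
      simp only [hgt, if_true]
      refine ⟨?_, hget, ?_⟩
      · rw [hout, List.filter_append, List.filter_filter,
          List.filter_cons, List.filter_nil]
        simp only [hfx, Bool.false_eq_true, if_false, List.append_nil]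
        apply List.filter_congr; intro y _
        rw [hcx y]
        by_cases hy : y = x <;> simp [hy] <;> omega
      · intro v
        rw [PySem.Set.mem_add, hban v, hcx v]
        by_cases hv : v = x <;> simp [hv, List.mem_append] <;> omega
    · -- still within the limit: append x
      have hfx : decide (((pref ++ [x]).count x : Int) ≤ n) = true := by
        rw [decide_eq_true_eq, hcx x]; simp; omega
      simp only [hgt, if_false]
      refine ⟨?_, hget, ?_⟩
      · rw [hout, List.filter_append, hpref (Or.inr (by omega)),
          List.filter_cons, List.filter_nil, hfx]
        simp
      · intro v
        rw [hban v, hcx v]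
        by_cases hv : v = x
        · have h1 : ¬ n < (pref.count x : Int) := by omega
          simp [hv, List.mem_append, h1, hgt]
        · simp [hv, List.mem_append]

theorem altLoop_inv (n : Int) (l pref : List Int)
    (s : List Int × PySem.Dict Int Int × PySem.Set Int) (h : AltInv n pref s) :
    AltInv n (pref ++ l) (l.foldl (answerAltStep n) s) := by
  induction l generalizing pref s with
  | nil => simpa using h
  | cons x l ih =>
    have := ih (pref ++ [x]) _ (altStep_inv n pref x s h)
    simpa using this

theorem answer_alt_eq_filter (data : List Int) (n : Int) :
    answer_alt data n = data.filter (fun x => decide ((data.count x : Int) ≤ n)) := by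
  have h0 : AltInv n [] ([], PySem.Dict.empty, PySem.Set.empty) := by
    refine ⟨by simp, by simp, by simp [PySem.Set.empty]⟩
  have := altLoop_inv n data [] _ h0
  simpa [answer_alt] using this.1

-- ===== VERDICT (by name: the statement is the Claim_ definition above) =====
theorem answer_spec : Claim_equal_answer := by
  intro data n _
  unfold Spec_answer
  rw [answer_eq_filter, answer_alt_eq_filter]
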